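-- pv_equiv track=rewrite | github.com/dtruong46me/leetcode-practice | prob_1205_2373.py | largestLocal
-- ===== SOURCE A (Python) =====
-- from typing import List
--
-- def largestLocal(grid: List[List[int]]) -> List[List[int]]:
--     n = len(grid)
--
--     res = [[0]*(n-2) for _ in range(n-2)]
--
--     for i in range(1, n-1):
--         for j in range(1, n-1):
--             res[i-1][j-1] = max(
--                 grid[i-1][j-1],
--                 grid[i][j-1],
--                 grid[i+1][j-1],
--                 grid[i-1][j],
--                 grid[i][j],
--                 grid[i+1][j],
--                 grid[i-1][j+1],
--                 grid[i][j+1],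
--                 grid[i+1][j+1]
--             )
--
--     return res
-- ===== SOURCE B (Python) =====
-- def largestLocal(grid):
--     n = len(grid)
--     if n < 3:
--         return []
--     horiz = [[max(row[j], row[j + 1], row[j + 2]) for j in range(n - 2)]
--              for row in grid]
--     return [[max(horiz[i][j], horiz[i + 1][j], horiz[i + 2][j]) for j in range(n - 2)]
--             for i in range(n - 2)]
-- ===== Notes on version B (the rewrite author's own statement) =====
-- stated objective: alternative
-- what changed: B computes the 3x3 window max in two separable passes (a row-wise 3-max table, then a column-wise 3-max over it) instead of A's single pass taking a 9-way max per cell into a preallocated mutable result.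
import Mathlib
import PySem

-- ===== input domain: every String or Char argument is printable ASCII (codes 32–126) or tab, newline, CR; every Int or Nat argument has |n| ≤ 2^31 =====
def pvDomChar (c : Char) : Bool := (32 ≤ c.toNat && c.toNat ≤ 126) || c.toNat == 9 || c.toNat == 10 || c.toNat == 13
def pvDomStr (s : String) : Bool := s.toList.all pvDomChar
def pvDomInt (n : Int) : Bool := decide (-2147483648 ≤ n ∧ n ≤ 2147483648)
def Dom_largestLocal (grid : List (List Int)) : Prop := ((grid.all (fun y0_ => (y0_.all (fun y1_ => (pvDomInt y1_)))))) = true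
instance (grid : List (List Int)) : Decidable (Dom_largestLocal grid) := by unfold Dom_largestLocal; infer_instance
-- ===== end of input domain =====

-- B replaces A's single pass with a 9-way max per cell by two separable passes:
-- a row-wise 3-max table, then a column-wise 3-max over that table.

-- ===== PORT A =====
-- shared indexing helpers: l[j] and g[i][j] (total via pyGetD; Pre_ keeps indices in range)
def pvGet (l : List Int) (j : Int) : Int := PySem.List.pyGetD l j 0
def pvGet2 (g : List (List Int)) (i j : Int) : Int := pvGet (PySem.List.pyGetD g i []) j

def largestLocal (grid : List (List Int)) : List (List Int) :=
  let n : Int := grid.length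
  let res0 : List (List Int) :=
    (PySem.List.pyRange 0 (n - 2) 1).map (fun _ =>
      (PySem.List.pyRange 0 (n - 2) 1).map (fun _ => (0 : Int)))
  (PySem.List.pyRange 1 (n - 1) 1).foldl (fun res i =>
    (PySem.List.pyRange 1 (n - 1) 1).foldl (fun res j =>
      PySem.List.pySetD res (i - 1)
        (PySem.List.pySetD (PySem.List.pyGetD res (i - 1) []) (j - 1)
          (max (max (max (max (max (max (max (max
            (pvGet2 grid (i - 1) (j - 1))
            (pvGet2 grid i (j - 1)))
            (pvGet2 grid (i + 1) (j - 1)))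
            (pvGet2 grid (i - 1) j))
            (pvGet2 grid i j))
            (pvGet2 grid (i + 1) j))
            (pvGet2 grid (i - 1) (j + 1)))
            (pvGet2 grid i (j + 1)))
            (pvGet2 grid (i + 1) (j + 1))))) res) res0

-- ===== PORT B =====
def largestLocal_alt (grid : List (List Int)) : List (List Int) :=
  let n : Int := grid.length
  if n < 3 then []
  else
    let horiz : List (List Int) :=
      grid.map (fun row =>
        (PySem.List.pyRange 0 (n - 2) 1).map (fun j =>
          max (max (pvGet row j) (pvGet row (j + 1))) (pvGet row (j + 2))))
    (PySem.List.pyRange 0 (n - 2) 1).map (fun i =>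
      (PySem.List.pyRange 0 (n - 2) 1).map (fun j =>
        max (max (pvGet2 horiz i j) (pvGet2 horiz (i + 1) j)) (pvGet2 horiz (i + 2) j)))

-- ===== PRECONDITION & SPEC =====
-- Pre_ excludes exactly the inputs on which the Python A raises IndexError:
-- grids with at least 3 rows in which some row is shorter than the number of rows.
def Pre_largestLocal (grid : List (List Int)) : Prop :=
  3 ≤ grid.length → ∀ r ∈ grid, grid.length ≤ r.length
instance (grid : List (List Int)) : Decidable (Pre_largestLocal grid) := by
  unfold Pre_largestLocal; infer_instance
def pvWitness_largestLocal : List (List Int) := [[1, 2, 3], [4, 5, 6], [7, 8, 9]]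

def Spec_largestLocal (grid : List (List Int)) (out : List (List Int)) : Prop := out = largestLocal_alt grid
instance (grid : List (List Int)) (out : List (List Int)) : Decidable (Spec_largestLocal grid out) := by unfold Spec_largestLocal; infer_instance

-- ===== CLAIM (what is proved, stated in full; the proofs are below) =====
def Claim_equal_largestLocal : Prop := ∀ (grid : List (List Int)), Dom_largestLocal grid → Pre_largestLocal grid → Spec_largestLocal grid (largestLocal grid)

-- ===== LEMMAS AND PROOFS =====

-- proof-only helpers: the common closed form of one output cell
def pvT (grid : List (List Int)) (a b : Nat) : Int := (grid.getD a []).getD b 0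
def pvH (grid : List (List Int)) (a s : Nat) : Int :=
  max (max (pvT grid a s) (pvT grid a (s + 1))) (pvT grid a (s + 2))
def pvCell (grid : List (List Int)) (t s : Nat) : Int :=
  max (max (pvH grid t s) (pvH grid (t + 1) s)) (pvH grid (t + 2) s)

-- regrouping a left-nested 9-way max (A's column-major order) into 3 row maxes (B's shape)
theorem pv_max9 (a1 a2 a3 b1 b2 b3 c1 c2 c3 : Int) :
    max (max (max (max (max (max (max (max a1 a2) a3) b1) b2) b3) c1) c2) c3
    = max (max (max (max a1 b1) c1) (max (max a2 b2) c2)) (max (max a3 b3) c3) := by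
  simp only [max_assoc]
  simp [max_left_comm]

-- A's cell value (at loop indices i = 1+t, j = 1+s) is the closed form pvCell
theorem pv_A_cell (grid : List (List Int)) (t s : Nat) :
    max (max (max (max (max (max (max (max
      (pvGet2 grid ((t:Int)) ((s:Int)))
      (pvGet2 grid (1 + (t:Int)) ((s:Int))))
      (pvGet2 grid (1 + (t:Int) + 1) ((s:Int))))
      (pvGet2 grid ((t:Int)) (1 + (s:Int))))
      (pvGet2 grid (1 + (t:Int)) (1 + (s:Int))))
      (pvGet2 grid (1 + (t:Int) + 1) (1 + (s:Int))))
      (pvGet2 grid ((t:Int)) (1 + (s:Int) + 1)))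
      (pvGet2 grid (1 + (t:Int)) (1 + (s:Int) + 1)))
      (pvGet2 grid (1 + (t:Int) + 1) (1 + (s:Int) + 1))
    = pvCell grid t s := by
  have e1 : (1 + (t:Int)) = ((t + 1 : Nat) : Int) := by omega
  have e2 : (1 + (t:Int) + 1) = ((t + 2 : Nat) : Int) := by omega
  have f1 : (1 + (s:Int)) = ((s + 1 : Nat) : Int) := by omega
  have f2 : (1 + (s:Int) + 1) = ((s + 2 : Nat) : Int) := by omega
  rw [e2, f2, e1, f1, pv_max9]
  simp only [pvCell, pvH, pvT, pvGet2, pvGet, PySem.List.pyGetD_natCast]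

-- fixed-row update distributed out of a fold (A's inner loop touches only row p)
theorem pv_foldl_set_set {alpha : Type} (g : Nat → alpha) (p : Nat) (l : List Nat) :
    ∀ (res : List (List alpha)), p < res.length →
    l.foldl (fun r c => r.set p ((r.getD p []).set c (g c))) res
    = res.set p (l.foldl (fun row c => row.set c (g c)) (res.getD p [])) := by
  induction l with
  | nil =>
    intro res hp
    simp [List.getD_eq_getElem?_getD, List.getElem?_eq_getElem hp]
  | cons c l ih =>
    intro res hp
    simp only [List.foldl_cons]
    rw [ih _ (by simpa using hp)]
    have hget : ((res.set p ((res.getD p []).set c (g c))).getD p [])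
        = (res.getD p []).set c (g c) := by
      simp [List.getD_eq_getElem?_getD, hp]
    rw [hget, List.set_set]

-- A's inner loop on a row of length k overwrites every entry: the row becomes a map
theorem pv_foldl_range_set {alpha : Type} (g : Nat → alpha) :
    ∀ (k : Nat) (row : List alpha), k ≤ row.length →
    (List.range k).foldl (fun r c => r.set c (g c)) row
    = (List.range k).map g ++ row.drop k := by
  intro k
  induction k with
  | zero => intro row _; simp
  | succ k ih =>
    intro row hk
    rw [List.range_succ, List.foldl_append, ih row (by omega)]
    simp only [List.foldl_cons, List.foldl_nil]
    have hdrop : row.drop k = row[k] :: row.drop (k + 1) :=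
      List.drop_eq_getElem_cons (by omega)
    rw [hdrop, List.set_append]
    simp
    rw [hdrop]
    rfl

-- A's outer loop: each iteration replaces row t by (range k).map (M t)
theorem pv_A_outer {alpha : Type} (M : Nat → Nat → alpha) (k : Nat) :
    ∀ (K : Nat) (res : List (List alpha)), K ≤ res.length →
    (∀ i, i < res.length → (res.getD i []).length = k) →
    (List.range K).foldl
      (fun res t => (List.range k).foldl
        (fun r s => r.set t ((r.getD t []).set s (M t s))) res) res
    = (List.range K).map (fun t => (List.range k).map (M t)) ++ res.drop K := by
  intro K
  induction K with
  | zero => intro res _ _; simp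
  | succ K ih =>
    intro res hK hrows
    rw [List.range_succ, List.foldl_append, ih res (by omega) hrows]
    simp only [List.foldl_cons, List.foldl_nil]
    have hlenmap : ((List.range K).map (fun t => (List.range k).map (M t))).length = K := by simp
    have hlen2 : ((List.range K).map (fun t => (List.range k).map (M t)) ++ res.drop K).length
        = res.length := by simp; omega
    have hgetK : (((List.range K).map (fun t => (List.range k).map (M t)) ++ res.drop K).getD K [])
        = res.getD K [] := by
      rw [← hlenmap]
      simp [List.getD_eq_getElem?_getD, List.getElem?_append_right]
    rw [pv_foldl_set_set (M K) K (List.range k)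
        ((List.range K).map (fun t => (List.range k).map (M t)) ++ res.drop K)
        (by rw [hlen2]; omega), hgetK,
      pv_foldl_range_set (M K) k (res.getD K []) (le_of_eq (hrows K (by omega)).symm)]
    have hr : (res.getD K []).length = k := hrows K (by omega)
    rw [show List.drop k (res.getD K []) = ([] : List alpha) by rw [← hr, List.drop_length],
      List.append_nil]
    have hdrop : res.drop K = res[K] :: res.drop (K + 1) :=
      List.drop_eq_getElem_cons (by omega)
    rw [hdrop, List.set_append]
    simp [hlenmap]
    rw [hdrop]
    rfl

-- closed form of port A for grids with at least 3 rows
theorem pv_A_eq (grid : List (List Int)) (k : Nat) (hk : grid.length = k + 2) :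
    largestLocal grid
    = (List.range k).map (fun t => (List.range k).map (fun s => pvCell grid t s)) := by
  have h1 : (((grid.length : Int)) - 1 - 1).toNat = k := by omega
  have h2 : (((grid.length : Int)) - 2 - 0).toNat = k := by omega
  simp only [largestLocal, PySem.List.pyRange_one, h1, h2, List.foldl_map, List.map_map,
    show ∀ t : Nat, (1 : Int) + (t : Int) - 1 = ((t : Nat) : Int) from fun t => by omega,
    PySem.List.pySetD_natCast, PySem.List.pyGetD_natCast]
  rw [pv_A_outer
      (fun t s => max (max (max (max (max (max (max (max
        (pvGet2 grid ((t:Int)) ((s:Int)))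
        (pvGet2 grid (1 + (t:Int)) ((s:Int))))
        (pvGet2 grid (1 + (t:Int) + 1) ((s:Int))))
        (pvGet2 grid ((t:Int)) (1 + (s:Int))))
        (pvGet2 grid (1 + (t:Int)) (1 + (s:Int))))
        (pvGet2 grid (1 + (t:Int) + 1) (1 + (s:Int))))
        (pvGet2 grid ((t:Int)) (1 + (s:Int) + 1)))
        (pvGet2 grid (1 + (t:Int)) (1 + (s:Int) + 1)))
        (pvGet2 grid (1 + (t:Int) + 1) (1 + (s:Int) + 1)))
      k k _ (by simp) ?rows]
  case rows =>
    intro i hi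
    simp only [List.length_map, List.length_range] at hi
    simp [List.getD_eq_getElem?_getD, hi]
  rw [List.drop_eq_nil_of_le (by simp), List.append_nil]
  simp only [pv_A_cell]

-- B's cell: reading the horizontal-max table at (a, s) gives the row max pvH
theorem pv_B_cell (grid : List (List Int)) (k : Nat) (hk : grid.length = k + 2)
    (a s : Nat) (ha : a < k + 2) (hs : s < k) :
    pvGet2 (grid.map (fun row => (List.range k).map (fun (j : Nat) =>
        max (max (pvGet row (j : Int)) (pvGet row ((j : Int) + 1))) (pvGet row ((j : Int) + 2)))))
      (a : Int) (s : Int) = pvH grid a s := by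
  have hag : a < grid.length := by omega
  simp only [pvGet2, pvGet, PySem.List.pyGetD_natCast, List.getD_eq_getElem?_getD,
    List.getElem?_map, List.getElem?_eq_getElem hag, Option.map_some, Option.getD_some]
  rw [List.getElem?_range hs]
  simp only [Option.map_some, Option.getD_some]
  have g1 : ((s : Int) + 1) = ((s + 1 : Nat) : Int) := by omega
  have g2 : ((s : Int) + 2) = ((s + 2 : Nat) : Int) := by omega
  rw [g1, g2, PySem.List.pyGetD_natCast, PySem.List.pyGetD_natCast]
  simp only [pvH, pvT, List.getD_eq_getElem?_getD, List.getElem?_eq_getElem hag,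
    Option.getD_some]

-- closed form of port B for grids with at least 3 rows
theorem pv_B_eq (grid : List (List Int)) (k : Nat) (hk : grid.length = k + 2)
    (h3 : 3 ≤ grid.length) :
    largestLocal_alt grid
    = (List.range k).map (fun t => (List.range k).map (fun s => pvCell grid t s)) := by
  have hn3 : ¬ ((grid.length : Int) < 3) := by omega
  have h2 : (((grid.length : Int)) - 2 - 0).toNat = k := by omega
  simp only [largestLocal_alt, if_neg hn3, PySem.List.pyRange_one, h2, List.map_map,
    Function.comp_def, zero_add]
  apply List.map_congr_left
  intro t ht
  rw [List.mem_range] at ht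
  apply List.map_congr_left
  intro s hs
  rw [List.mem_range] at hs
  have e1 : ((t : Int) + 1) = ((t + 1 : Nat) : Int) := by omega
  have e2 : ((t : Int) + 2) = ((t + 2 : Nat) : Int) := by omega
  rw [e1, e2,
    pv_B_cell grid k hk t s (by omega) hs,
    pv_B_cell grid k hk (t + 1) s (by omega) hs,
    pv_B_cell grid k hk (t + 2) s (by omega) hs]
  rfl

-- ===== VERDICT (by name: the statement is the Claim_ definition above) =====
theorem largestLocal_spec : Claim_equal_largestLocal := by
  intro grid _ _
  unfold Spec_largestLocal
  by_cases h3 : grid.length < 3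
  · have h2 : ((grid.length : Int) - 2) ≤ 0 := by omega
    have h1 : ((grid.length : Int) - 1) ≤ 1 := by omega
    simp [largestLocal, largestLocal_alt, PySem.List.pyRange_one_eq_nil h2,
      PySem.List.pyRange_one_eq_nil h1, show ((grid.length : Int) < 3) by omega]
  · obtain ⟨k, hk⟩ : ∃ k, grid.length = k + 2 := ⟨grid.length - 2, by omega⟩
    rw [pv_A_eq grid k hk, pv_B_eq grid k hk (by omega)]
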